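-- pv_equiv track=rewrite | github.com/gamboacode/sequence_analysis | sequence_analysis.py | context_list
-- ===== SOURCE A (Python) =====
-- def context_list(s, k):
--     """Returns dictionary where the keys are k-mers and the
--     values are the concatenation of symbols appearing after each k-mer.
--
--     Example:
--     >>> s = "AACGTAACGT"
--     >>> k = 3
--     >>> context_list(s, k)
--     {'AAC': 'GG', 'ACG': 'T', 'CGT': 'A', 'GTA': 'A', 'TAA': 'C', 'ACG': 'T'}
--     """
--     start = 0
--     dic = {}
--     while start + k <= len(s) - 1:
--         kmer = s[start:start + k]
--         if kmer in dic:
--             dic[kmer].append(s[start + k])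
--         else:
--             dic[kmer] = [s[start + k]]
--         start += 1
--     for key, val in dic.items():
--         dic[key] = "".join(val)
--     return dic
-- ===== SOURCE B (Python) =====
-- def context_list(s, k):
--     pairs = [(s[i:i + k], s[i + k]) for i in range(len(s) - k)]
--     return {km: "".join(c for kk, c in pairs if kk == km)
--             for km in dict.fromkeys(km for km, _ in pairs)}
-- ===== Notes on version B (the rewrite author's own statement) =====
-- stated objective: simpler
-- what changed: Replaces A's incremental dict-of-lists accumulation with a join pass by materializing the (kmer, follower) pairs once, deduplicating kmers in first-occurrence order, and building each value with one filtering scan over the pairs.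
import Mathlib
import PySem

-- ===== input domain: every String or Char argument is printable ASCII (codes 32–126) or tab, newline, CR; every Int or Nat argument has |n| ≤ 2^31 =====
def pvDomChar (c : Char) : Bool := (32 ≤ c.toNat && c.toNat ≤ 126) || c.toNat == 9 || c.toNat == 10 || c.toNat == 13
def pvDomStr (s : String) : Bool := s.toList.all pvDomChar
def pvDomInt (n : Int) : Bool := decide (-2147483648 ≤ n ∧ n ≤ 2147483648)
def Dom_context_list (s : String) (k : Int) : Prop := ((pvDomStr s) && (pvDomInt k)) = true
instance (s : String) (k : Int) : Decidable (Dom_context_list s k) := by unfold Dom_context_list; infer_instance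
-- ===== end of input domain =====

-- B replaces A's incremental dict-of-lists accumulation + join pass by: materialize the (kmer, follower)
-- pairs once, dedupe the kmers in first-occurrence order, and build each value by one filtering scan
-- over the pairs (objective: simpler — no mutation, two comprehensions).

-- ===== PORT A =====
-- A's followers s[start+k] are 1-char strings; they are represented as Char, so ''.join(val) is String.ofList.
-- The counting while-loop 'start = 0; while start + k <= len(s) - 1: …; start += 1' runs start over
-- exactly range(0, len(s) - k); s[start+k] is in range under Pre_, so pyGetD's default is never used.
def context_list (s : String) (k : Int) : List (String × String) :=
  let cs := s.toList
  let d := (PySem.List.pyRange 0 ((cs.length : Int) - k) 1).foldl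
    (fun (d : PySem.Dict (List Char) (List Char)) start =>
      let kmer := PySem.List.slice cs (some start) (some (start + k))
      let c := PySem.List.pyGetD cs (start + k) ' '
      if d.contains kmer then d.modify kmer [] (fun v => v ++ [c])
      else d.insert kmer [c])
    PySem.Dict.empty
  d.items.map (fun p => (String.ofList p.1, String.ofList p.2))

-- ===== PORT B =====
-- dict.fromkeys-style ordered dedup is PySem.List.dedup; ''.join of the generator is String.ofList of the map.
def context_list_alt (s : String) (k : Int) : List (String × String) :=
  let cs := s.toList
  let pairs := (PySem.List.pyRange 0 ((cs.length : Int) - k) 1).map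
    (fun i => (PySem.List.slice cs (some i) (some (i + k)), PySem.List.pyGetD cs (i + k) ' '))
  (PySem.List.dedup (pairs.map (fun p => p.1))).map
    (fun km => (String.ofList km, String.ofList ((pairs.filter (fun p => p.1 == km)).map (fun p => p.2))))

-- ===== PRECONDITION & SPEC =====
-- Pre_ excludes exactly the inputs where A raises IndexError: s[start + k] at start = 0 is out of
-- range iff k < -len(s) (inside the loop start + k ≤ len(s) - 1 always holds). Nothing A returns on is excluded.
def Pre_context_list (s : String) (k : Int) : Prop := -(s.toList.length : Int) ≤ k
instance (s : String) (k : Int) : Decidable (Pre_context_list s k) := by unfold Pre_context_list; infer_instance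
def pvWitness_context_list : String × Int := ("AACGTAACGT", 3)
def Spec_context_list (s : String) (k : Int) (out : List (String × String)) : Prop := out = context_list_alt s k
instance (s : String) (k : Int) (out : List (String × String)) : Decidable (Spec_context_list s k out) := by unfold Spec_context_list; infer_instance

-- ===== CLAIM (what is proved, stated in full; the proofs are below) =====
def Claim_equal_context_list : Prop := ∀ (s : String) (k : Int), Dom_context_list s k → Pre_context_list s k → Spec_context_list s k (context_list s k)

-- ===== LEMMAS AND PROOFS =====

-- A's in-dict branch is exactly dict.modify (an absent key gets f applied to the default).
theorem branch_eq_modify (d : PySem.Dict (List Char) (List Char)) (km : List Char) (c : Char) :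
    (if d.contains km then d.modify km [] (fun v => v ++ [c]) else d.insert km [c])
      = d.modify km [] (fun v => v ++ [c]) := by
  by_cases h : d.contains km
  · simp [h]
  · simp [h, PySem.Dict.modify,
      PySem.Dict.getD_of_not_contains d ([] : List Char) (by simpa using h)]

-- The grouping fold's items, in closed form: first-occurrence keys with filtered followers.
theorem groupDict_items (pairs : List (List Char × Char)) :
    (pairs.foldl (fun (d : PySem.Dict (List Char) (List Char)) p =>
        if d.contains p.1 then d.modify p.1 [] (fun v => v ++ [p.2]) else d.insert p.1 [p.2])
      PySem.Dict.empty).items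
    = (PySem.List.dedup (pairs.map (fun p => p.1))).map
        (fun km => (km, (pairs.filter (fun p => p.1 == km)).map (fun p => p.2))) := by
  rw [PySem.List.foldl_congr_mem _ _
      (fun d p => d.modify p.1 [] (fun v => v ++ [p.2])) _
      (fun acc x _ => branch_eq_modify acc x.1 x.2)]
  have hnd : (pairs.foldl (fun (d : PySem.Dict (List Char) (List Char)) p =>
      d.modify p.1 [] (fun v => v ++ [p.2])) PySem.Dict.empty).keys.Nodup := by
    exact PySem.Dict.nodup_keys_foldl_modify_key pairs Prod.fst []
      (fun _ p => (fun v => v ++ [p.2])) PySem.Dict.empty (by simp)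
  rw [PySem.Dict.items_eq_map_keys _ hnd []]
  rw [PySem.Dict.keys_foldl_modify_key pairs Prod.fst []
      (fun _ p => (fun v => v ++ [p.2])) PySem.Dict.empty]
  have hkeys : PySem.Set.update (PySem.Dict.empty (κ := List Char) (ν := List Char)).keys (pairs.map Prod.fst)
      = PySem.List.dedup (pairs.map (fun p => p.1)) := rfl
  rw [hkeys]
  refine List.map_congr_left (fun km _ => ?_)
  rw [PySem.Dict.getD_foldl_modify_append pairs PySem.Dict.empty km]
  simp

theorem context_list_eq (s : String) (k : Int) :
    context_list s k = context_list_alt s k := by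
  unfold context_list context_list_alt
  simp only []
  rw [show (PySem.List.pyRange 0 ((s.toList.length : Int) - k) 1).foldl
      (fun (d : PySem.Dict (List Char) (List Char)) start =>
        if d.contains (PySem.List.slice s.toList (some start) (some (start + k))) then
          d.modify (PySem.List.slice s.toList (some start) (some (start + k))) []
            (fun v => v ++ [PySem.List.pyGetD s.toList (start + k) ' '])
        else
          d.insert (PySem.List.slice s.toList (some start) (some (start + k)))
            [PySem.List.pyGetD s.toList (start + k) ' '])
      PySem.Dict.empty
    = ((PySem.List.pyRange 0 ((s.toList.length : Int) - k) 1).map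
        (fun i => (PySem.List.slice s.toList (some i) (some (i + k)),
                   PySem.List.pyGetD s.toList (i + k) ' '))).foldl
      (fun (d : PySem.Dict (List Char) (List Char)) p =>
        if d.contains p.1 then d.modify p.1 [] (fun v => v ++ [p.2]) else d.insert p.1 [p.2])
      PySem.Dict.empty
    from (List.foldl_map
      (f := fun i => (PySem.List.slice s.toList (some i) (some (i + k)),
                      PySem.List.pyGetD s.toList (i + k) ' '))
      (g := fun (d : PySem.Dict (List Char) (List Char)) p =>
        if d.contains p.1 then d.modify p.1 [] (fun v => v ++ [p.2]) else d.insert p.1 [p.2])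
      (l := PySem.List.pyRange 0 ((s.toList.length : Int) - k) 1)
      (init := PySem.Dict.empty)).symm]
  rw [groupDict_items]
  rw [List.map_map]
  rfl

-- ===== VERDICT (by name: the statement is the Claim_ definition above) =====
theorem context_list_spec : Claim_equal_context_list := by
  intro s k _ _
  exact context_list_eq s k
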